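-- pv_equiv track=rewrite | github.com/msft-mirror-aosp/platform.external.toolchain-utils | rust_tools/auto_update_rust_bootstrap.py | find_raw_bootstrap_sequence_lines
-- ===== SOURCE A (Python) =====
-- from typing import Dict, Iterable, List, Optional, Tuple, Union
--
-- def find_raw_bootstrap_sequence_lines(
--     ebuild_lines: List[str],
-- ) -> Tuple[int, int]:
--     """Returns the start/end lines of RUSTC_RAW_FULL_BOOTSTRAP_SEQUENCE."""
--     for i, line in enumerate(ebuild_lines):
--         if line.startswith("RUSTC_RAW_FULL_BOOTSTRAP_SEQUENCE=("):
--             start = i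
--             break
--     else:
--         raise ValueError("No bootstrap sequence start found in text")
--
--     for i, line in enumerate(ebuild_lines[i + 1 :], i + 1):
--         if line.rstrip() == ")":
--             return start, i
--     raise ValueError("No bootstrap sequence end found in text")
-- ===== SOURCE B (Python) =====
-- def find_raw_bootstrap_sequence_lines(ebuild_lines):
--     """Returns the start/end lines of RUSTC_RAW_FULL_BOOTSTRAP_SEQUENCE."""
--     starts = [
--         i
--         for i, line in enumerate(ebuild_lines)
--         if line.startswith("RUSTC_RAW_FULL_BOOTSTRAP_SEQUENCE=(")
--     ]
--     if not starts:
--         raise ValueError("No bootstrap sequence start found in text")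
--     start = starts[0]
--     ends = [i for i, line in enumerate(ebuild_lines) if line.rstrip() == ")"]
--     for end in ends:
--         if end > start:
--             return start, end
--     raise ValueError("No bootstrap sequence end found in text")
-- ===== Notes on version B (the rewrite author's own statement) =====
-- stated objective: alternative
-- what changed: Instead of A's scan-then-scan-a-slice with break/else control flow, B first materialises the index lists of all start-marker lines and all ')' lines over the whole input, then selects starts[0] and the first end index greater than it.
import Mathlib
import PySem

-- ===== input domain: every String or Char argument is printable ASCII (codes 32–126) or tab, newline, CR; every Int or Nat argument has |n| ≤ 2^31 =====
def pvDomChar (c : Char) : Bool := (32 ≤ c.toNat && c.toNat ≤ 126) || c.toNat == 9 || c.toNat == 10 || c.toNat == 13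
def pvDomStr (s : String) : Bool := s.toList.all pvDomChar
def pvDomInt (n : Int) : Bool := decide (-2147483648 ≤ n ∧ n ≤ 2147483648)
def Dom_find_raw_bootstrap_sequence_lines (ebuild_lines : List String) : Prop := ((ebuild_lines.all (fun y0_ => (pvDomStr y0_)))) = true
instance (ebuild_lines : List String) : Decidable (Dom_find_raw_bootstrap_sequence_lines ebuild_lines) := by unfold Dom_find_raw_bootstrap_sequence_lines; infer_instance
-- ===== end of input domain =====

-- B replaces A's scan-then-scan-a-slice (break/for-else) with precomputed index lists
-- of start-marker and ')' lines, selecting starts[0] and the first end index > it;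
-- equivalence on inputs where A returns (Pre_ excludes A's ValueError cases, where B
-- raises the same ValueError).

def pvStartMarker : String := "RUSTC_RAW_FULL_BOOTSTRAP_SEQUENCE=("

def pvIsStart (l : String) : Bool := PySem.Str.startswith l pvStartMarker

def pvIsEnd (l : String) : Bool := PySem.Str.rstrip l == ")"

-- ===== PORT A =====
-- A's loops: enumerate + break, returning the position of the first matching line.
def firstIdxA (p : String → Bool) : List String → Option Nat
  | [] => none
  | l :: ls => if p l then some 0 else (firstIdxA p ls).map (· + 1)

-- A raises ValueError where either search fails; those inputs are excluded by Pre_, port returns (0, 0) there.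
def find_raw_bootstrap_sequence_lines (ebuild_lines : List String) : Int × Int :=
  match firstIdxA pvIsStart ebuild_lines with
  | none => (0, 0)
  | some i =>
    -- ebuild_lines[i+1:] with i ≥ 0 is List.drop (i+1); enumerate(…, i+1) makes the returned index i+1+k
    match firstIdxA pvIsEnd (ebuild_lines.drop (i + 1)) with
    | none => (0, 0)
    | some k => ((i : Int), ((i + 1 + k : Nat) : Int))

-- ===== PORT B =====
-- B's comprehension: the list of indices of lines satisfying p, counting from i.
def idxWhere (p : String → Bool) : List String → Nat → List Nat
  | [], _ => []
  | l :: ls, i => if p l then i :: idxWhere p ls (i + 1) else idxWhere p ls (i + 1)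

def find_raw_bootstrap_sequence_lines_alt (ebuild_lines : List String) : Int × Int :=
  match (idxWhere pvIsStart ebuild_lines 0).head? with
  | none => (0, 0)  -- B raises ValueError (no start), excluded by Pre_
  | some start =>
    match (idxWhere pvIsEnd ebuild_lines 0).find? (fun e => decide (start < e)) with
    | some e => ((start : Int), (e : Int))
    | none => (0, 0)  -- B raises ValueError (no end), excluded by Pre_

-- ===== PRECONDITION & SPEC =====
-- Pre_ excludes exactly the inputs where A raises ValueError (no start marker line, or no ")" line after it); B raises the same ValueError there.
def Pre_find_raw_bootstrap_sequence_lines (ebuild_lines : List String) : Prop :=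
  (match ebuild_lines.findIdx? pvIsStart with
   | some i => (ebuild_lines.drop (i + 1)).any pvIsEnd
   | none => false) = true

instance (ebuild_lines : List String) : Decidable (Pre_find_raw_bootstrap_sequence_lines ebuild_lines) := by
  unfold Pre_find_raw_bootstrap_sequence_lines; infer_instance

def pvWitness_find_raw_bootstrap_sequence_lines : List String :=
  ["# header", "RUSTC_RAW_FULL_BOOTSTRAP_SEQUENCE=(", "\t1.70.0", ")", "tail"]

def Spec_find_raw_bootstrap_sequence_lines (ebuild_lines : List String) (out : Int × Int) : Prop := out = find_raw_bootstrap_sequence_lines_alt ebuild_lines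
instance (ebuild_lines : List String) (out : Int × Int) : Decidable (Spec_find_raw_bootstrap_sequence_lines ebuild_lines out) := by unfold Spec_find_raw_bootstrap_sequence_lines; infer_instance

-- ===== CLAIM =====
def Claim_equal_find_raw_bootstrap_sequence_lines : Prop := ∀ (ebuild_lines : List String), Dom_find_raw_bootstrap_sequence_lines ebuild_lines → Pre_find_raw_bootstrap_sequence_lines ebuild_lines → Spec_find_raw_bootstrap_sequence_lines ebuild_lines (find_raw_bootstrap_sequence_lines ebuild_lines)

-- ===== LEMMAS AND PROOFS =====

theorem firstIdxA_eq_findIdx? (p : String → Bool) (ls : List String) :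
    firstIdxA p ls = ls.findIdx? p := by
  induction ls with
  | nil => rfl
  | cons l ls ih => simp [firstIdxA, List.findIdx?_cons, ih]

theorem idxWhere_head? (p : String → Bool) (ls : List String) (i : Nat) :
    (idxWhere p ls i).head? = (firstIdxA p ls).map (i + ·) := by
  induction ls generalizing i with
  | nil => rfl
  | cons l ls ih =>
    by_cases h : p l
    · simp [idxWhere, firstIdxA, h]
    · simp only [idxWhere, firstIdxA, h, if_neg, Bool.false_eq_true, not_false_eq_true, ih,
        Option.map_map]
      cases firstIdxA p ls with
      | none => rfl
      | some k => simp; omega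

theorem idxWhere_find?_gt (p : String → Bool) (s : Nat) (ls : List String) (i : Nat) :
    (idxWhere p ls i).find? (fun e => decide (s < e)) =
      (firstIdxA p (ls.drop (s + 1 - i))).map (fun k => max i (s + 1) + k) := by
  induction ls generalizing i with
  | nil => simp [idxWhere, firstIdxA]
  | cons l ls ih =>
    by_cases h : p l
    · by_cases hi : s < i
      · have hd : s + 1 - i = 0 := by omega
        simp [idxWhere, h, hd, firstIdxA, hi]
      · have hd : s + 1 - i = (s - i) + 1 := by omega
        have hd2 : s + 1 - (i + 1) = s - i := by omega
        have hm : max (i + 1) (s + 1) = max i (s + 1) := by omega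
        have hb : decide (s < i) = false := by simp [hi]
        simp only [idxWhere, h, if_pos, List.find?_cons, hb]
        rw [ih, hd, hd2, List.drop_succ_cons, hm]
    · by_cases hi : s < i
      · have hd : s + 1 - i = 0 := by omega
        have hd2 : s + 1 - (i + 1) = 0 := by omega
        have hm : max (i + 1) (s + 1) = i + 1 := by omega
        have hm2 : max i (s + 1) = i := by omega
        simp only [idxWhere, h, Bool.false_eq_true, not_false_eq_true, if_neg, ih, hd, hd2,
          List.drop_zero, firstIdxA, hm, hm2, Option.map_map]
        cases firstIdxA p ls with
        | none => rfl
        | some k => simp; omega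
      · have hd : s + 1 - i = (s - i) + 1 := by omega
        have hd2 : s + 1 - (i + 1) = s - i := by omega
        have hm : max (i + 1) (s + 1) = max i (s + 1) := by omega
        simp only [idxWhere, h, Bool.false_eq_true, not_false_eq_true, if_neg, ih, hd, hd2,
          List.drop_succ_cons, hm]

theorem firstIdxA_none_iff (p : String → Bool) (ls : List String) :
    firstIdxA p ls = none ↔ ls.any p = false := by
  induction ls with
  | nil => simp [firstIdxA]
  | cons l ls ih => by_cases h : p l <;> simp [firstIdxA, h, ih]

-- ===== VERDICT =====
theorem find_raw_bootstrap_sequence_lines_spec : Claim_equal_find_raw_bootstrap_sequence_lines := by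
  intro xs _dom hpre
  unfold Spec_find_raw_bootstrap_sequence_lines
  unfold Pre_find_raw_bootstrap_sequence_lines at hpre
  unfold find_raw_bootstrap_sequence_lines find_raw_bootstrap_sequence_lines_alt
  rw [idxWhere_head?, firstIdxA_eq_findIdx?]
  cases hidx : xs.findIdx? pvIsStart with
  | none => simp [hidx] at hpre
  | some i =>
    rw [hidx] at hpre
    simp only [Option.map_some, Nat.zero_add]
    rw [idxWhere_find?_gt]
    have hdrop : i + 1 - 0 = i + 1 := by omega
    rw [hdrop]
    cases hend : firstIdxA pvIsEnd (xs.drop (i + 1)) with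
    | none => rw [firstIdxA_none_iff] at hend; simp [hend] at hpre
    | some k =>
      simp only [Option.map_some]
      have : max 0 (i + 1) = i + 1 := by omega
      rw [this]
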